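-- pv_equiv track=rewrite | github.com/ouzdeville/AbgebraicCode | polynome.py | poly_sommeq
-- ===== SOURCE A (Python) =====
-- def polynome(p):
--     n=len(p)
--     while p[n-1]==0 and n>1:
--         del(p[n-1])
--         n=len(p)
--     return p
--
-- def poly_sommeq(p,q,k):
--     n=len(p)
--     m=len(q)
--     s=[]
--     if n==m:
--         for i in range(m):
--             s.append((p[i] + q[i])%k)
--         return polynome(s)
--     elif n>m:
--         for i in range(m):
--             s.append((p[i] + q[i])%k)
--         for i in range(n-m):
--             s.append(p[m+i])
--         return polynome(s)
--     else:
--         for i in range(n):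
--             s.append((p[i] + q[i])%k)
--         for i in range(m-n):
--             s.append(q[n+i])
--         return polynome(s)
-- ===== SOURCE B (Python) =====
-- def poly_sommeq(p, q, k):
--     n, m = len(p), len(q)
--
--     def coeff(i):
--         if i < n and i < m:
--             return (p[i] + q[i]) % k
--         return p[i] if i < n else q[i]
--
--     t = max(n, m) - 1
--     while t > 0 and coeff(t) == 0:
--         t -= 1
--     return [coeff(j) for j in range(t + 1)]
-- ===== Notes on version B (the rewrite author's own statement) =====
-- stated objective: alternative
-- what changed: B never materialises the untrimmed sum: an on-demand coeff(i) function replaces A's three length-case branches, a top-down scan finds the last surviving coefficient (replacing build-then-delete trimming via polynome), and one comprehension emits the result.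
import Mathlib
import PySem

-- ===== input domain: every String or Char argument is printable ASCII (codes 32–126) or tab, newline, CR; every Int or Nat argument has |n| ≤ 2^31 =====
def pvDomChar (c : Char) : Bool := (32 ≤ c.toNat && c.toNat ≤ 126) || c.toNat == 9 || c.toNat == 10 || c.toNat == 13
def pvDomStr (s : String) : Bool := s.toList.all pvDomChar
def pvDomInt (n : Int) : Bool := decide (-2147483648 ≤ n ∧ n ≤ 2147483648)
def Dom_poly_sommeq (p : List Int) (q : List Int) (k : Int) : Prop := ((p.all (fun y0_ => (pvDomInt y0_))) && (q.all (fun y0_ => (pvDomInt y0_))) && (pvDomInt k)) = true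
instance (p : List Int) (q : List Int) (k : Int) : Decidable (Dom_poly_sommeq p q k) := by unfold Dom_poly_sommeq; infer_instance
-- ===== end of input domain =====

-- B never materialises the untrimmed sum: it scans indices top-down with an on-demand
-- coefficient function to find the last surviving coefficient, then emits the answer in
-- one comprehension (objective: alternative; no length-case branches, no build-then-delete).

-- ===== PORT A =====
-- A's helper polynome: while p[n-1]==0 and n>1: del p[n-1].  p[n-1] on the empty list raises
-- IndexError in Python (excluded by Pre_); the .getD 1 default only makes the port total there.
def pvPolynomeA (p : List Int) : List Int :=
  if _h : (PySem.List.pyGet? p ((p.length : Int) - 1)).getD 1 = 0 ∧ p.length > 1 then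
    pvPolynomeA p.dropLast
  else p
termination_by p.length
decreasing_by
  have : 1 < p.length := _h.2
  simp [List.length_dropLast]; omega

-- indices i are always in range inside the loops, so List.getD is exact for p[i]/q[i]
def poly_sommeq (p : List Int) (q : List Int) (k : Int) : List Int :=
  let n := p.length
  let m := q.length
  if n = m then
    pvPolynomeA ((List.range m).foldl
      (fun s i => s ++ [PySem.Int.mod (p.getD i 0 + q.getD i 0) k]) [])
  else if n > m then
    pvPolynomeA ((List.range (n - m)).foldl
      (fun s i => s ++ [p.getD (m + i) 0])
      ((List.range m).foldl
        (fun s i => s ++ [PySem.Int.mod (p.getD i 0 + q.getD i 0) k]) []))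
  else
    pvPolynomeA ((List.range (m - n)).foldl
      (fun s i => s ++ [q.getD (n + i) 0])
      ((List.range n).foldl
        (fun s i => s ++ [PySem.Int.mod (p.getD i 0 + q.getD i 0) k]) []))

-- ===== PORT B =====
-- B's coeff(i): mod-k sum on the overlap, raw coefficient of the longer list beyond it
def pvCoeffB (p : List Int) (q : List Int) (k : Int) (i : Nat) : Int :=
  if i < p.length ∧ i < q.length then PySem.Int.mod (p.getD i 0 + q.getD i 0) k
  else if i < p.length then p.getD i 0 else q.getD i 0

-- the while loop 't -= 1 while t > 0 and coeff(t) == 0', as recursion on t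
def pvFindTop (p : List Int) (q : List Int) (k : Int) : Nat → Nat
  | 0 => 0
  | i + 1 => if pvCoeffB p q k (i + 1) = 0 then pvFindTop p q k i else i + 1

-- Python's t starts at max(n,m)-1, an int; the 'if L = 0' branch is the Nat encoding of
-- t = -1, where range(t+1) is empty — same computation, made total over Nat.
def poly_sommeq_alt (p : List Int) (q : List Int) (k : Int) : List Int :=
  let L := max p.length q.length
  if L = 0 then []
  else (List.range (pvFindTop p q k (L - 1) + 1)).map (pvCoeffB p q k)

-- ===== PRECONDITION & SPEC =====
-- Pre_ excludes exactly the inputs where A raises: p=q=[] (IndexError in polynome) and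
-- k=0 with both lists nonempty (ZeroDivisionError in the overlap loop).
def Pre_poly_sommeq (p : List Int) (q : List Int) (k : Int) : Prop :=
  (p ≠ [] ∨ q ≠ []) ∧ (k ≠ 0 ∨ p = [] ∨ q = [])
instance (p : List Int) (q : List Int) (k : Int) : Decidable (Pre_poly_sommeq p q k) := by
  unfold Pre_poly_sommeq; infer_instance

def pvWitness_poly_sommeq : List Int × List Int × Int := ([1, 2], [3], 2)

def Spec_poly_sommeq (p : List Int) (q : List Int) (k : Int) (out : List Int) : Prop :=
  out = poly_sommeq_alt p q k
instance (p : List Int) (q : List Int) (k : Int) (out : List Int) : Decidable (Spec_poly_sommeq p q k out) := by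
  unfold Spec_poly_sommeq; infer_instance

-- ===== CLAIM (what is proved, stated in full; the proofs are below) =====
def Claim_equal_poly_sommeq : Prop := ∀ (p : List Int) (q : List Int) (k : Int),
  Dom_poly_sommeq p q k → Pre_poly_sommeq p q k → Spec_poly_sommeq p q k (poly_sommeq p q k)

-- ===== LEMMAS AND PROOFS =====

-- A's append loop builds init ++ map f (range n)
theorem pv_foldl_build (f : Nat → Int) :
    ∀ (n : Nat) (init : List Int),
      (List.range n).foldl (fun s i => s ++ [f i]) init = init ++ (List.range n).map f := by
  intro n
  induction n with
  | zero => simp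
  | succ n ih =>
    intro init
    simp [List.range_succ, List.foldl_append, ih]

-- A's trimming of range-built lists equals B's top-down search for the last kept index
theorem pv_trim_findTop (f : Nat → Int) (g : Nat → Nat)
    (hg0 : g 0 = 0) (hg : ∀ i, g (i + 1) = if f (i + 1) = 0 then g i else i + 1) :
    ∀ n, pvPolynomeA ((List.range (n + 1)).map f) = (List.range (g n + 1)).map f := by
  intro n
  induction n with
  | zero =>
    rw [pvPolynomeA, hg0]
    simp
  | succ n ih =>
    have hsplit : (List.range (n + 2)).map f = (List.range (n + 1)).map f ++ [f (n + 1)] := by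
      rw [List.range_succ, List.map_append]; simp
    rw [pvPolynomeA, hsplit]
    have hlen : (((List.range (n + 1)).map f ++ [f (n + 1)]).length : Int) - 1 = ((n + 1 : Nat) : Int) := by
      simp
    rw [hlen, PySem.List.pyGet?_natCast]
    have hget : ((List.range (n + 1)).map f ++ [f (n + 1)])[(n + 1 : Nat)]? = some (f (n + 1)) := by
      rw [List.getElem?_append_right (by simp)]
      simp
    rw [hget]
    by_cases hz : f (n + 1) = 0
    · have hcond : (Option.some (f (n + 1))).getD 1 = 0 ∧ ((List.range (n + 1)).map f ++ [f (n + 1)]).length > 1 := by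
        constructor
        · simpa using hz
        · simp
      rw [dif_pos hcond]
      have hdl : ((List.range (n + 1)).map f ++ [f (n + 1)]).dropLast = (List.range (n + 1)).map f := by
        simp
      rw [hdl, ← hsplit] at *
      rw [hg n, if_pos hz]
      simpa [hsplit] using ih
    · rw [dif_neg (by simp [hz]), hg n, if_neg hz, ← hsplit]

-- B's coeff agrees with A's overlap term on the overlap …
theorem pv_coeff_overlap (p q : List Int) (k : Int) (i : Nat)
    (h1 : i < p.length) (h2 : i < q.length) :
    pvCoeffB p q k i = PySem.Int.mod (p.getD i 0 + q.getD i 0) k := by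
  simp [pvCoeffB, h1, h2]

-- … and with the raw tail coefficient beyond it
theorem pv_coeff_tail_p (p q : List Int) (k : Int) (i : Nat)
    (h1 : i < p.length) (h2 : ¬ i < q.length) :
    pvCoeffB p q k i = p.getD i 0 := by
  simp [pvCoeffB, h1, h2]

theorem pv_coeff_tail_q (p q : List Int) (k : Int) (i : Nat)
    (h1 : ¬ i < p.length) :
    pvCoeffB p q k i = q.getD i 0 := by
  simp [pvCoeffB, h1]

-- A's fully built list s equals range (max n m) mapped through B's coeff
theorem pv_s_eq (p q : List Int) (k : Int) :
    (if p.length = q.length then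
      (List.range q.length).foldl (fun s i => s ++ [PySem.Int.mod (p.getD i 0 + q.getD i 0) k]) []
     else if p.length > q.length then
      (List.range (p.length - q.length)).foldl (fun s i => s ++ [p.getD (q.length + i) 0])
        ((List.range q.length).foldl (fun s i => s ++ [PySem.Int.mod (p.getD i 0 + q.getD i 0) k]) [])
     else
      (List.range (q.length - p.length)).foldl (fun s i => s ++ [q.getD (p.length + i) 0])
        ((List.range p.length).foldl (fun s i => s ++ [PySem.Int.mod (p.getD i 0 + q.getD i 0) k]) []))
    = (List.range (max p.length q.length)).map (pvCoeffB p q k) := by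
  by_cases h1 : p.length = q.length
  · rw [if_pos h1, pv_foldl_build, List.nil_append]
    have : max p.length q.length = q.length := by omega
    rw [this]
    apply List.map_congr_left
    intro i hi
    rw [List.mem_range] at hi
    exact (pv_coeff_overlap p q k i (by omega) hi).symm
  · rw [if_neg h1]
    by_cases h2 : p.length > q.length
    · rw [if_pos h2, pv_foldl_build, pv_foldl_build, List.nil_append]
      have hmax : max p.length q.length = q.length + (p.length - q.length) := by omega
      rw [hmax, List.range_add, List.map_append, List.map_map]
      congr 1
      · apply List.map_congr_left
        intro i hi
        rw [List.mem_range] at hi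
        exact (pv_coeff_overlap p q k i (by omega) hi).symm
      · apply List.map_congr_left
        intro i hi
        rw [List.mem_range] at hi
        exact (pv_coeff_tail_p p q k (q.length + i) (by omega) (by omega)).symm
    · rw [if_neg h2, pv_foldl_build, pv_foldl_build, List.nil_append]
      have hmax : max p.length q.length = p.length + (q.length - p.length) := by omega
      rw [hmax, List.range_add, List.map_append, List.map_map]
      congr 1
      · apply List.map_congr_left
        intro i hi
        rw [List.mem_range] at hi
        exact (pv_coeff_overlap p q k i hi (by omega)).symm
      · apply List.map_congr_left
        intro i hi
        rw [List.mem_range] at hi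
        exact (pv_coeff_tail_q p q k (p.length + i) (by omega)).symm

-- ===== VERDICT (by name: the statement is the Claim_ definition above) =====
theorem poly_sommeq_spec : Claim_equal_poly_sommeq := by
  intro p q k _ hpre
  unfold Spec_poly_sommeq poly_sommeq poly_sommeq_alt
  have hL : max p.length q.length ≠ 0 := by
    rcases hpre.1 with h | h
    · have := List.length_pos_iff.mpr h; omega
    · have := List.length_pos_iff.mpr h; omega
  simp only []
  rw [← apply_ite pvPolynomeA, ← apply_ite pvPolynomeA, pv_s_eq p q k]
  rw [if_neg hL]
  have hL1 : max p.length q.length = (max p.length q.length - 1) + 1 := by omega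
  rw [hL1]
  exact pv_trim_findTop (pvCoeffB p q k) (pvFindTop p q k) rfl
    (fun i => rfl) (max p.length q.length - 1)
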